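-- pv_equiv track=rewrite | github.com/moffergeld/mvv-sync | pages/06_GPS_Import.py | maak_lijst_uniek
-- ===== SOURCE A (Python) =====
-- def maak_lijst_uniek(lijst):
--     seen = {}
--     out = []
--     for item in lijst:
--         if item in seen:
--             seen[item] += 1
--             out.append(f"{item}_{seen[item]}")
--         else:
--             seen[item] = 1
--             out.append(item)
--     return out
-- ===== SOURCE B (Python) =====
-- def maak_lijst_uniek(lijst):
--     groups = {}
--     for i, item in enumerate(lijst):
--         groups.setdefault(item, []).append(i)
--     out = [""] * len(lijst)
--     for item, idxs in groups.items():
--         for rank, i in enumerate(idxs):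
--             out[i] = item if rank == 0 else f"{item}_{rank + 1}"
--     return out
-- ===== Notes on version B (the rewrite author's own statement) =====
-- stated objective: alternative
-- what changed: B replaces A's single running-counter scan by a two-phase group-and-scatter: one pass builds a dict mapping each value to the list of indices where it occurs, then each group is enumerated and its renamed occurrences are written back into a preallocated output list by original position.
import Mathlib
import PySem

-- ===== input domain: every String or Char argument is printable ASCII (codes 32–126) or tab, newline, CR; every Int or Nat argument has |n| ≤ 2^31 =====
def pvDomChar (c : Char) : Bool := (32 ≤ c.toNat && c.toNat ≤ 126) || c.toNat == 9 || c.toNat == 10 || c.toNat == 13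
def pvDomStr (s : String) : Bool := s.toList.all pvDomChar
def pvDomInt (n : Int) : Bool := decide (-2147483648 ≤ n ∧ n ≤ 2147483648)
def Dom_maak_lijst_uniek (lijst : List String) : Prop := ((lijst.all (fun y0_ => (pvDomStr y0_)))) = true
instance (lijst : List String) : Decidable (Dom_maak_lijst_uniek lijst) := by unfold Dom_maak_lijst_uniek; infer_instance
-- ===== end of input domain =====

-- B replaces A's running-counter scan by a group-by-indices pass followed by a scatter back into positions (alternative decomposition, not faster).

-- ===== PORT A =====
-- one loop iteration: the running dict 'seen' plus the output list built so far
def mluStep (st : PySem.Dict String Int × List String) (item : String) :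
    PySem.Dict String Int × List String :=
  match st.1.get? item with
  | some n => (st.1.insert item (n + 1), st.2 ++ [item ++ "_" ++ PySem.Int.toStr (n + 1)])
  | none   => (st.1.insert item 1, st.2 ++ [item])

def maak_lijst_uniek (lijst : List String) : List String :=
  (lijst.foldl mluStep (PySem.Dict.empty, [])).2

-- ===== PORT B =====
-- first loop of Source B: groups.setdefault(item, []).append(i)  (= modify item [] (· ++ [i]))
def mluGroups (lijst : List String) : PySem.Dict String (List Int) :=
  (PySem.List.enumerate lijst 0).foldl
    (fun d p => d.modify p.2 [] (fun l => l ++ [p.1])) PySem.Dict.empty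

-- inner loop of Source B's second phase: for rank, i in enumerate(idxs): out[i] = …
def mluWriteGroup (out : List String) (g : String × List Int) : List String :=
  (PySem.List.enumerate g.2 0).foldl
    (fun o q => PySem.List.pySetD o q.2
      (if q.1 = 0 then g.1 else g.1 ++ "_" ++ PySem.Int.toStr (q.1 + 1))) out

def maak_lijst_uniek_alt (lijst : List String) : List String :=
  (mluGroups lijst).items.foldl mluWriteGroup (List.replicate lijst.length "")

-- ===== PRECONDITION & SPEC =====
def Spec_maak_lijst_uniek (lijst : List String) (out : List String) : Prop := out = maak_lijst_uniek_alt lijst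
instance (lijst : List String) (out : List String) : Decidable (Spec_maak_lijst_uniek lijst out) := by unfold Spec_maak_lijst_uniek; infer_instance

-- ===== CLAIM (what is proved, stated in full; the proofs are below) =====
def Claim_equal_maak_lijst_uniek : Prop := ∀ (lijst : List String), Dom_maak_lijst_uniek lijst → Spec_maak_lijst_uniek lijst (maak_lijst_uniek lijst)

-- ===== LEMMAS AND PROOFS =====

-- the common reference value at position j: first occurrence stays, k-th occurrence (k ≥ 2) gets "_k"
def mluF (lijst : List String) (j : Nat) (h : j < lijst.length) : String :=
  if (lijst.take j).count lijst[j] = 0 then lijst[j]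
  else lijst[j] ++ "_" ++ PySem.Int.toStr (((lijst.take j).count lijst[j] : Int) + 1)

-- reference element list built pointwise (proof-side only)
def mluSpine (p rest : List String) : List String :=
  match rest with
  | [] => []
  | x :: xs =>
      (if p.count x = 0 then x else x ++ "_" ++ PySem.Int.toStr ((p.count x : Int) + 1))
        :: mluSpine (p ++ [x]) xs

-- ---- A's side: A's fold computes mluSpine ----
theorem mluA_spine (rest : List String) : ∀ (p out : List String)
    (seen : PySem.Dict String Int),
    (∀ v, seen.get? v = if p.count v = 0 then none else some ((p.count v : Int))) →
    (rest.foldl mluStep (seen, out)).2 = out ++ mluSpine p rest := by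
  induction rest with
  | nil => intro p out seen _; simp [mluSpine]
  | cons x xs ih =>
    intro p out seen hinv
    have hx := hinv x
    simp only [List.foldl_cons, mluSpine]
    by_cases h0 : p.count x = 0
    · rw [show mluStep (seen, out) x = (seen.insert x 1, out ++ [x]) by
        simp [mluStep, hx, h0]]
      rw [ih (p ++ [x]) (out ++ [x]) _ ?_]
      · simp [h0]
      · intro v
        by_cases hv : v = x
        · subst hv
          simp [PySem.Dict.get?_insert_self, List.count_append, h0]
        · have hv' : ¬ x = v := fun h => hv h.symm
          rw [PySem.Dict.get?_insert_of_ne _ _ hv, hinv v]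
          simp [List.count_append, hv']
    · rw [show mluStep (seen, out) x
          = (seen.insert x ((p.count x : Int) + 1),
             out ++ [x ++ "_" ++ PySem.Int.toStr ((p.count x : Int) + 1)]) by
        simp [mluStep, hx, h0]]
      rw [ih (p ++ [x]) _ _ ?_]
      · simp [h0]
      · intro v
        by_cases hv : v = x
        · subst hv
          simp [PySem.Dict.get?_insert_self, List.count_append]
        · have hv' : ¬ x = v := fun h => hv h.symm
          rw [PySem.Dict.get?_insert_of_ne _ _ hv, hinv v]
          simp [List.count_append, hv']

theorem mluSpine_length (rest : List String) : ∀ p, (mluSpine p rest).length = rest.length := by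
  induction rest with
  | nil => intro p; simp [mluSpine]
  | cons x xs ih => intro p; simp [mluSpine, ih]

theorem mluSpine_getElem? (rest : List String) : ∀ (p : List String) (j : Nat) (h : j < rest.length),
    (mluSpine p rest)[j]? = some
      (if ((p ++ rest).take (p.length + j)).count (rest[j]) = 0 then rest[j]
       else rest[j] ++ "_" ++ PySem.Int.toStr ((((p ++ rest).take (p.length + j)).count (rest[j]) : Int) + 1)) := by
  induction rest with
  | nil => intro p j h; simp at h
  | cons x xs ih =>
    intro p j h
    match j with
    | 0 =>
      simp [mluSpine]
    | Nat.succ k =>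
      have hk : k < xs.length := by simpa using h
      have := ih (p ++ [x]) k hk
      simp only [mluSpine, List.getElem?_cons_succ]
      rw [this]
      have harr : (p ++ [x]) ++ xs = p ++ x :: xs := by simp
      have hlen : (p ++ [x]).length + k = p.length + (k + 1) := by simp; omega
      rw [harr, hlen]
      simp

-- ---- B's side ----

-- indices (as Python ints) at which v occurs, in order
def mluIdxs (lijst : List String) (v : String) : List Int :=
  ((PySem.List.enumerate lijst 0).filter (fun p => p.2 == v)).map (·.1)

theorem mluGroups_getD (lijst : List String) (v : String) :
    (mluGroups lijst).getD v [] = mluIdxs lijst v := by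
  unfold mluGroups mluIdxs
  rw [show (PySem.List.enumerate lijst 0).foldl
        (fun d p => d.modify p.2 [] (fun l => l ++ [p.1])) PySem.Dict.empty
      = ((PySem.List.enumerate lijst 0).map Prod.swap).foldl
        (fun d p => d.modify p.1 [] (fun l => l ++ [p.2])) PySem.Dict.empty by
    rw [List.foldl_map]; rfl]
  rw [PySem.Dict.getD_foldl_modify_append]
  simp [PySem.Dict.getD_empty, List.filter_map, List.map_map, Function.comp_def, Prod.swap]

theorem mluGroups_keys (lijst : List String) :
    (mluGroups lijst).keys = PySem.Set.ofList lijst := by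
  unfold mluGroups
  rw [PySem.Dict.keys_foldl_modify_key]
  simp [PySem.List.map_snd_enumerate, PySem.Dict.keys_empty, PySem.Set.update_nil_left]

theorem mluGroups_keys_nodup (lijst : List String) : (mluGroups lijst).keys.Nodup := by
  rw [mluGroups_keys]; exact PySem.Set.nodup_ofList _

theorem mluGroups_items (lijst : List String) :
    (mluGroups lijst).items = (PySem.Set.ofList lijst).map (fun v => (v, mluIdxs lijst v)) := by
  rw [PySem.Dict.items_eq_map_keys _ (mluGroups_keys_nodup lijst) []]
  rw [mluGroups_keys]
  exact List.map_congr_left (fun v _ => by rw [mluGroups_getD])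

theorem mluIdxs_length (lijst : List String) (v : String) :
    (mluIdxs lijst v).length = lijst.count v := by
  unfold mluIdxs
  rw [List.length_map, ← List.countP_eq_length_filter]
  conv_rhs => rw [← PySem.List.map_snd_enumerate lijst 0]
  rw [List.count, List.countP_map]
  rfl

theorem mluIdxs_mem (lijst : List String) (v : String) (i : Int) (h : i ∈ mluIdxs lijst v) :
    ∃ (j : Nat) (hj : j < lijst.length), i = (j : Int) ∧ lijst[j] = v := by
  unfold mluIdxs at h
  obtain ⟨p, hp, hpi⟩ := List.mem_map.mp h
  obtain ⟨hmem, heq⟩ := List.mem_filter.mp hp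
  obtain ⟨k, hk, hpk⟩ := (PySem.List.mem_enumerate_iff _ _ _).mp hmem
  refine ⟨k, hk, ?_, ?_⟩
  · rw [← hpi, hpk]; simp
  · have := eq_of_beq heq
    rw [hpk] at this; simpa using this

theorem mluIdxs_nodup (lijst : List String) (v : String) : (mluIdxs lijst v).Nodup := by
  unfold mluIdxs
  have h1 : ((PySem.List.enumerate lijst 0).filter (fun p => p.2 == v)).Pairwise
      (fun p q => p.1 < q.1) :=
    List.Pairwise.filter _ (PySem.List.pairwise_lt_enumerate lijst 0)
  have h2 := List.pairwise_map.mpr h1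
  exact h2.imp (fun h => ne_of_lt h)

-- the rank of occurrence j inside its group is its prefix count
theorem mluIdxs_rank (lijst : List String) : ∀ (j : Nat) (hj : j < lijst.length),
    (mluIdxs lijst (lijst[j]))[((lijst.take j).count lijst[j])]? = some (j : Int) := by
  induction lijst using List.reverseRecOn with
  | nil => intro j hj; simp at hj
  | append_singleton xs x ih =>
    intro j hj
    rw [List.length_append, List.length_singleton] at hj
    by_cases hjx : j < xs.length
    · have hget : (xs ++ [x])[j] = xs[j] := List.getElem_append_left hjx
      rw [hget]
      have htake : (xs ++ [x]).take j = xs.take j :=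
        List.take_append_of_le_length (le_of_lt hjx)
      rw [htake]
      have hidx : mluIdxs (xs ++ [x]) xs[j] = mluIdxs xs xs[j] ++
          (if x == xs[j] then [((xs.length : Int))] else []) := by
        unfold mluIdxs
        rw [PySem.List.enumerate_append, List.filter_append, List.map_append]
        congr 1
        simp only [PySem.List.enumerate_cons, PySem.List.enumerate_nil,
          List.filter_cons, List.filter_nil]
        by_cases hx : (x == xs[j]) <;> simp [hx]
      rw [hidx]
      have hlt : (xs.take j).count xs[j] < (mluIdxs xs xs[j]).length := by
        rw [mluIdxs_length]
        calc (xs.take j).count xs[j] < (xs.take (j+1)).count xs[j] := by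
              rw [List.take_add_one, List.count_append]
              simp [List.getElem?_eq_getElem hjx]
          _ ≤ xs.count xs[j] := List.Sublist.count_le _ (List.take_sublist _ _)
      rw [List.getElem?_append_left hlt]
      exact ih j hjx
    · have hj' : j = xs.length := by omega
      subst hj'
      have hget : (xs ++ [x])[xs.length] = x := by
        simp
      rw [hget]
      have htake : (xs ++ [x]).take xs.length = xs := by simp
      rw [htake]
      have hidx : mluIdxs (xs ++ [x]) x = mluIdxs xs x ++ [((xs.length : Int))] := by
        unfold mluIdxs
        rw [PySem.List.enumerate_append]
        simp [PySem.List.enumerate_cons, PySem.List.enumerate_nil]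
      rw [hidx]
      have hlen : xs.count x = (mluIdxs xs x).length := (mluIdxs_length xs x).symm
      rw [hlen, List.getElem?_append_right (le_refl _)]
      simp

-- generic scatter lemmas: a fold of pySetD writes
theorem mluScatter_len (E : List (Int × Int)) (f : Int → String) : ∀ (out : List String),
    (E.foldl (fun o q => PySem.List.pySetD o q.2 (f q.1)) out).length = out.length := by
  induction E with
  | nil => intro out; simp
  | cons q E ih =>
    intro out
    simp only [List.foldl_cons]
    rw [ih, PySem.List.length_pySetD]

theorem mluScatter_untouched (E : List (Int × Int)) (f : Int → String) (j : Nat) :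
    ∀ (out : List String), (∀ q ∈ E, 0 ≤ q.2) → (↑j ∉ E.map (·.2)) →
    (E.foldl (fun o q => PySem.List.pySetD o q.2 (f q.1)) out)[j]? = out[j]? := by
  induction E with
  | nil => intro out _ _; rfl
  | cons q E ih =>
    intro out hpos hj
    simp only [List.map_cons, List.mem_cons, not_or] at hj
    simp only [List.foldl_cons]
    rw [ih _ (fun q hq => hpos q (List.mem_cons_of_mem _ hq)) hj.2]
    have hq0 : 0 ≤ q.2 := hpos q (List.mem_cons_self)
    rw [PySem.List.pySetD_of_nonneg _ _ hq0]
    rw [List.getElem?_set_ne]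
    intro hEq
    apply hj.1
    omega

theorem mluScatter_written (E : List (Int × Int)) (f : Int → String) (j : Nat) (r : Int) :
    ∀ (out : List String), (∀ q ∈ E, 0 ≤ q.2) → (E.map (·.2)).Nodup → (r, (j : Int)) ∈ E →
    j < out.length →
    (E.foldl (fun o q => PySem.List.pySetD o q.2 (f q.1)) out)[j]? = some (f r) := by
  induction E with
  | nil => intro out _ _ h _; simp at h
  | cons q E ih =>
    intro out hpos hnd hmem hj
    simp only [List.map_cons, List.nodup_cons] at hnd
    rcases List.mem_cons.mp hmem with h | h
    · subst h
      simp only [List.foldl_cons]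
      rw [mluScatter_untouched _ _ _ _ (fun q hq => hpos q (List.mem_cons_of_mem _ hq)) hnd.1]
      rw [PySem.List.pySetD_natCast]
      rw [List.getElem?_set_self hj]
    · have hq2 : q.2 ≠ (j : Int) := by
        intro hEq
        apply hnd.1
        have hmem2 : ((r : Int), q.2) ∈ E := by rw [hEq]; exact h
        exact List.mem_map.mpr ⟨(r, q.2), hmem2, rfl⟩
      simp only [List.foldl_cons]
      apply ih _ (fun q hq => hpos q (List.mem_cons_of_mem _ hq)) hnd.2 h
      rw [PySem.List.length_pySetD]
      exact hj

-- one group: writes exactly the positions of v, with their ranked names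
theorem mluWriteGroup_spec (lijst : List String) (v : String) (out : List String)
    (hout : out.length = lijst.length) (j : Nat) (hj : j < lijst.length) :
    (mluWriteGroup out (v, mluIdxs lijst v))[j]? =
      if lijst[j] = v then some (mluF lijst j hj) else out[j]? := by
  unfold mluWriteGroup
  simp only
  have hmap : (PySem.List.enumerate (mluIdxs lijst v) 0).map (·.2) = mluIdxs lijst v :=
    PySem.List.map_snd_enumerate _ _
  have hpos : ∀ q ∈ PySem.List.enumerate (mluIdxs lijst v) 0, 0 ≤ q.2 := by
    intro q hq
    have : q.2 ∈ mluIdxs lijst v := by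
      rw [← hmap]; exact List.mem_map.mpr ⟨q, hq, rfl⟩
    obtain ⟨k, _, hk, _⟩ := mluIdxs_mem lijst v q.2 this
    omega
  by_cases hv : lijst[j] = v
  · subst hv
    rw [if_pos rfl]
    have hrank := mluIdxs_rank lijst j hj
    obtain ⟨hrlt, hrget⟩ := List.getElem?_eq_some_iff.mp hrank
    have hmem : (((List.count lijst[j] (lijst.take j) : Nat) : Int), (j : Int)) ∈
        PySem.List.enumerate (mluIdxs lijst lijst[j]) 0 := by
      rw [PySem.List.mem_enumerate_iff]
      exact ⟨_, hrlt, by simp [hrget]⟩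
    have hnd' : ((PySem.List.enumerate (mluIdxs lijst lijst[j]) 0).map (·.2)).Nodup := by
      rw [hmap]; exact mluIdxs_nodup _ _
    rw [mluScatter_written (PySem.List.enumerate (mluIdxs lijst lijst[j]) 0)
      (fun r => if r = 0 then lijst[j] else lijst[j] ++ "_" ++ PySem.Int.toStr (r + 1))
      j _ out hpos hnd' hmem (by omega)]
    unfold mluF
    by_cases hr0 : (lijst.take j).count lijst[j] = 0
    · simp [hr0]
    · have hne : (((lijst.take j).count lijst[j] : Nat) : Int) ≠ 0 := by exact_mod_cast hr0
      simp [hr0]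
  · rw [mluScatter_untouched (PySem.List.enumerate (mluIdxs lijst v) 0)
      (fun r => if r = 0 then v else v ++ "_" ++ PySem.Int.toStr (r + 1)) j out hpos]
    · simp [hv]
    · rw [hmap]
      intro hmem
      obtain ⟨k, hk, hik, hkv⟩ := mluIdxs_mem lijst v _ hmem
      have : k = j := by omega
      exact hv (this ▸ hkv)

theorem mluWriteGroup_len (lijst : List String) (v : String) (out : List String) :
    (mluWriteGroup out (v, mluIdxs lijst v)).length = out.length := by
  unfold mluWriteGroup
  exact mluScatter_len _ (fun r => if r = 0 then v else v ++ "_" ++ PySem.Int.toStr (r + 1)) out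

-- the second phase as a fold over the keys
theorem mluFold_spec (lijst : List String) (ks : List String) : ∀ (out : List String),
    out.length = lijst.length →
    (ks.foldl (fun o v => mluWriteGroup o (v, mluIdxs lijst v)) out).length = lijst.length ∧
    ∀ (j : Nat) (hj : j < lijst.length),
      (ks.foldl (fun o v => mluWriteGroup o (v, mluIdxs lijst v)) out)[j]? =
        if lijst[j] ∈ ks then some (mluF lijst j hj) else out[j]? := by
  induction ks with
  | nil => intro out hout; exact ⟨hout, fun j hj => by simp⟩
  | cons v ks ih =>
    intro out hout
    have hlen1 : (mluWriteGroup out (v, mluIdxs lijst v)).length = lijst.length := by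
      rw [mluWriteGroup_len]; exact hout
    obtain ⟨hlen, hval⟩ := ih (mluWriteGroup out (v, mluIdxs lijst v)) hlen1
    refine ⟨by simpa using hlen, fun j hj => ?_⟩
    simp only [List.foldl_cons]
    rw [hval j hj]
    by_cases hks : lijst[j] ∈ ks
    · simp [hks]
    · rw [if_neg hks, mluWriteGroup_spec lijst v out hout j hj]
      by_cases hv : lijst[j] = v
      · simp [hv]
      · simp [hv, hks]

-- B computes mluF at every position
theorem mluAlt_getElem? (lijst : List String) (j : Nat) (hj : j < lijst.length) :
    (maak_lijst_uniek_alt lijst)[j]? = some (mluF lijst j hj) := by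
  unfold maak_lijst_uniek_alt
  rw [mluGroups_items, List.foldl_map]
  obtain ⟨_, hval⟩ := mluFold_spec lijst (PySem.Set.ofList lijst)
    (List.replicate lijst.length "") (by simp)
  rw [hval j hj, if_pos]
  rw [PySem.Set.mem_ofList]
  exact List.getElem_mem hj

theorem mluAlt_length (lijst : List String) :
    (maak_lijst_uniek_alt lijst).length = lijst.length := by
  unfold maak_lijst_uniek_alt
  rw [mluGroups_items, List.foldl_map]
  exact (mluFold_spec lijst _ _ (by simp)).1

-- A computes mluF at every position
theorem mluA_getElem? (lijst : List String) (j : Nat) (hj : j < lijst.length) :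
    (maak_lijst_uniek lijst)[j]? = some (mluF lijst j hj) := by
  unfold maak_lijst_uniek
  rw [mluA_spine lijst [] [] PySem.Dict.empty
      (by intro v; simp [PySem.Dict.get?_empty])]
  rw [List.nil_append]
  have h := mluSpine_getElem? lijst [] j hj
  rw [h]
  unfold mluF
  simp

theorem mluA_length (lijst : List String) :
    (maak_lijst_uniek lijst).length = lijst.length := by
  unfold maak_lijst_uniek
  rw [mluA_spine lijst [] [] PySem.Dict.empty
      (by intro v; simp [PySem.Dict.get?_empty])]
  simp [mluSpine_length]

theorem maak_lijst_uniek_eq (lijst : List String) :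
    maak_lijst_uniek lijst = maak_lijst_uniek_alt lijst := by
  apply List.ext_getElem?
  intro j
  by_cases hj : j < lijst.length
  · rw [mluA_getElem? lijst j hj, mluAlt_getElem? lijst j hj]
  · rw [List.getElem?_eq_none (by rw [mluA_length]; omega),
        List.getElem?_eq_none (by rw [mluAlt_length]; omega)]

-- ===== VERDICT (by name: the statement is the Claim_ definition above) =====
theorem maak_lijst_uniek_spec : Claim_equal_maak_lijst_uniek := by
  intro lijst _
  exact maak_lijst_uniek_eq lijst
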